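-- pv_equiv track=rewrite | github.com/zainab-gilani/WebScraper | models/EntryRequirement.py | find_lowest_grade
-- ===== SOURCE A (Python) =====
-- def find_lowest_grade(grades: str) -> str:
--     """
--     Find the lowest grade in a set of A-level grades.
--     For example, in "AAB", the lowest grade is "B".
--
--     :param grades: A string of A-level grades (e.g., "AAB", "BCC")
--     :return: The lowest grade found (e.g., "B", "C")
--     """
--     if not grades:
--         return ""
--     # endif
--
--     grades = grades.strip().upper()
--     grade_order = ['A*', 'A', 'B', 'C', 'D', 'E']
--     lowest_grade = ""
--     lowest_index = -1
--
--     # Handle A* grades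
--     while 'A*' in grades:
--         if lowest_index < grade_order.index('A*'):
--             lowest_grade = 'A*'
--             lowest_index = grade_order.index('A*')
--         # endif
--         grades = grades.replace('A*', '', 1)
--     # endwhile
--
--     # Check remaining grades
--     for grade in grades:
--         if grade in grade_order:
--             grade_index = grade_order.index(grade)
--             if grade_index > lowest_index:
--                 lowest_grade = grade
--                 lowest_index = grade_index
--             # endif
--         # endif
--     # endfor
--
--     return lowest_grade
-- ===== SOURCE B (Python) =====
-- def find_lowest_grade(grades: str) -> str:
--     if not grades:
--         return ""
--     g = grades.strip().upper()
--     # Cancel each '*' against the nearest preceding unmatched 'A' in one stack pass.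
--     stack = []
--     for ch in g:
--         if ch == '*' and stack and stack[-1] == 'A':
--             stack.pop()
--         else:
--             stack.append(ch)
--     saw_a_star = len(stack) < len(g)
--     # Probe the grade alphabet from lowest to highest priority.
--     for letter in 'EDCBA':
--         if letter in stack:
--             return letter
--     return 'A*' if saw_a_star else ''
-- ===== Notes on version B (the rewrite author's own statement) =====
-- stated objective: simpler
-- what changed: Replaces A's repeated one-at-a-time 'A*' replace loop and index-tracking character scan by a single stack pass that cancels each '*' against the preceding unmatched 'A', followed by probing the grade alphabet in reverse priority order and falling back to 'A*'.
import Mathlib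
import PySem

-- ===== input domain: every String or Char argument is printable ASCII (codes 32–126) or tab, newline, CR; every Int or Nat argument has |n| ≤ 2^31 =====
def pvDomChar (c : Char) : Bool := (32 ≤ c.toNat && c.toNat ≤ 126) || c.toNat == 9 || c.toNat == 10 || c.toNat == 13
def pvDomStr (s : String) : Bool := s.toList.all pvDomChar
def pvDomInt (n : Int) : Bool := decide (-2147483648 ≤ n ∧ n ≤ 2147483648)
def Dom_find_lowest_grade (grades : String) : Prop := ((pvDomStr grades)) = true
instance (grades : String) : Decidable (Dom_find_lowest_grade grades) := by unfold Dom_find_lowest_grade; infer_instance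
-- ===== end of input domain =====

-- B replaces A's index-tracking scan (plus one-at-a-time 'A*' removal loop) by a single
-- stack pass cancelling '*' against a preceding 'A', then probes the grade alphabet in
-- reverse priority order; objective: simpler.

-- ===== PORT A =====
-- grade_order, each Python string kept as its list of characters
def gradeOrder : List (List Char) := [['A','*'], ['A'], ['B'], ['C'], ['D'], ['E']]

-- grades.replace('A*', '', 1): removes the FIRST occurrence of "A*" (hand port, exact on
-- every input: PySem has no count-limited replace)
def rmAS : List Char → List Char
  | c₁ :: c₂ :: t => if c₁ = 'A' ∧ c₂ = '*' then t else c₁ :: rmAS (c₂ :: t)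
  | s => s

-- "does s contain the substring A*" as structural recursion (used only for the
-- termination proof of the while loop; proved equal to PySem.Chars.isIn below)
def hasAS : List Char → Bool
  | c₁ :: c₂ :: t => (decide (c₁ = 'A') && decide (c₂ = '*')) || hasAS (c₂ :: t)
  | _ => false

theorem hasAS_nil : hasAS [] = false := rfl

theorem hasAS_single (x : Char) : hasAS [x] = false := rfl

theorem hasAS_cons₂ (c₁ c₂ : Char) (t : List Char) :
    hasAS (c₁ :: c₂ :: t) = ((decide (c₁ = 'A') && decide (c₂ = '*')) || hasAS (c₂ :: t)) := rfl

theorem rmAS_cons₂ (c₁ c₂ : Char) (t : List Char) :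
    rmAS (c₁ :: c₂ :: t) = if c₁ = 'A' ∧ c₂ = '*' then t else c₁ :: rmAS (c₂ :: t) := rfl

theorem rmAS_length_lt : ∀ s : List Char, hasAS s = true → (rmAS s).length < s.length := by
  intro s
  induction s with
  | nil => simp [hasAS_nil]
  | cons x t ih =>
    cases t with
    | nil => simp [hasAS_single]
    | cons y t' =>
      intro h
      rw [hasAS_cons₂] at h
      simp only [Bool.or_eq_true, Bool.and_eq_true, decide_eq_true_eq] at h
      by_cases hxy : x = 'A' ∧ y = '*'
      · rw [rmAS_cons₂, if_pos hxy]
        simp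
      · have h2 : hasAS (y :: t') = true := by tauto
        have := ih h2
        rw [rmAS_cons₂, if_neg hxy]
        simp only [List.length_cons] at this ⊢
        omega

theorem hasAS_iff_infix : ∀ s : List Char, hasAS s = true ↔ ['A','*'] <:+: s := by
  intro s
  induction s with
  | nil =>
    rw [hasAS_nil]
    simp only [Bool.false_eq_true, false_iff]
    intro h; have := h.length_le; simp at this
  | cons x t ih =>
    cases t with
    | nil =>
      rw [hasAS_single]
      simp only [Bool.false_eq_true, false_iff]
      intro h; have := h.length_le; simp at this
    | cons y t' =>
      rw [hasAS_cons₂, List.infix_cons_iff]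
      constructor
      · intro h
        simp only [Bool.or_eq_true, Bool.and_eq_true, decide_eq_true_eq] at h
        rcases h with ⟨hx, hy⟩ | h
        · exact Or.inl (by simp [hx, hy, List.cons_prefix_cons])
        · exact Or.inr (ih.mp h)
      · intro h
        rcases h with h | h
        · rw [List.cons_prefix_cons, List.cons_prefix_cons] at h
          obtain ⟨hx, hy, -⟩ := h
          simp [hx.symm, hy.symm]
        · simp only [Bool.or_eq_true]
          exact Or.inr (ih.mpr h)

theorem isIn_AS_eq_hasAS (s : List Char) : PySem.Chars.isIn ['A','*'] s = hasAS s := by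
  by_cases h : hasAS s = true
  · rw [h, (PySem.Chars.isIn_iff_infix ['A','*'] s).mpr ((hasAS_iff_infix s).mp h)]
  · rw [Bool.not_eq_true] at h
    rw [h]
    exact Bool.eq_false_iff.mpr (fun he => by
      rw [(hasAS_iff_infix s).mpr ((PySem.Chars.isIn_iff_infix ['A','*'] s).mp he)] at h
      exact Bool.true_eq_false.mp h)

-- the while loop: state (grades, lowest_grade, lowest_index)
def aWhile (s lowest : List Char) (idx : Int) : List Char × List Char × Int :=
  if h : PySem.Chars.isIn ['A','*'] s = true then
    let p : List Char × Int :=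
      if idx < (((PySem.List.index? gradeOrder ['A','*']).getD 0 : Nat) : Int) then
        (['A','*'], (((PySem.List.index? gradeOrder ['A','*']).getD 0 : Nat) : Int))
      else (lowest, idx)
    aWhile (rmAS s) p.1 p.2
  else (s, lowest, idx)
termination_by s.length
decreasing_by exact rmAS_length_lt s (by rw [← isIn_AS_eq_hasAS]; exact h)

-- the body of the for loop over the remaining characters
def aForStep (st : List Char × Int) (c : Char) : List Char × Int :=
  if gradeOrder.contains [c] then
    let gi : Int := (((PySem.List.index? gradeOrder [c]).getD 0 : Nat) : Int)
    if st.2 < gi then ([c], gi) else st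
  else st

def find_lowest_grade (grades : String) : String :=
  if grades.toList = [] then ""
  else
    let g := PySem.Chars.upper (PySem.Chars.strip grades.toList)
    let w := aWhile g [] (-1)
    let f := w.1.foldl aForStep (w.2.1, w.2.2)
    String.ofList f.1

-- ===== PORT B =====
-- one stack pass: '*' cancels the nearest preceding unmatched 'A'
def bStep (st : List Char) (c : Char) : List Char :=
  if c = '*' ∧ st ≠ [] ∧ PySem.List.pyGet? st (-1) = some 'A' then st.dropLast else st ++ [c]

def find_lowest_grade_alt (grades : String) : String :=
  if grades.toList = [] then ""
  else
    let g := PySem.Chars.upper (PySem.Chars.strip grades.toList)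
    let stack := g.foldl bStep []
    match ['E','D','C','B','A'].find? (fun c => stack.contains c) with
    | some c => String.ofList [c]
    | none => if stack.length < g.length then "A*" else ""

-- ===== PRECONDITION & SPEC =====
def Spec_find_lowest_grade (grades : String) (out : String) : Prop := out = find_lowest_grade_alt grades
instance (grades : String) (out : String) : Decidable (Spec_find_lowest_grade grades out) := by unfold Spec_find_lowest_grade; infer_instance

-- ===== CLAIM (what is proved, stated in full; the proofs are below) =====
def Claim_equal_find_lowest_grade : Prop := ∀ (grades : String), Dom_find_lowest_grade grades → Spec_find_lowest_grade grades (find_lowest_grade grades)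

-- ===== LEMMAS AND PROOFS =====

-- the normal form of the repeated removal of the first "A*"
def N (s : List Char) : List Char :=
  if h : hasAS s = true then N (rmAS s) else s
termination_by s.length
decreasing_by exact rmAS_length_lt s h

theorem N_of_true {s : List Char} (h : hasAS s = true) : N s = N (rmAS s) := by
  rw [N]; simp [h]

theorem N_of_false {s : List Char} (h : hasAS s = false) : N s = s := by
  rw [N]; simp [h]

theorem hasAS_prefix_false : ∀ (p q : List Char), hasAS (p ++ q) = false → hasAS p = false := by
  intro p
  induction p with
  | nil => intro q _; rfl
  | cons x p' ih =>
    intro q h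
    cases p' with
    | nil => rfl
    | cons y p'' =>
      simp only [List.cons_append, hasAS_cons₂, Bool.or_eq_false_iff] at h ⊢
      exact ⟨h.1, by simpa using ih q (by simpa using h.2)⟩

theorem hasAS_pair : ∀ (p t : List Char), hasAS (p ++ 'A' :: '*' :: t) = true := by
  intro p
  induction p with
  | nil => intro t; simp [hasAS_cons₂]
  | cons x p' ih =>
    intro t
    cases p' with
    | nil => simp [hasAS_cons₂]
    | cons y p'' =>
      simp only [List.cons_append, hasAS_cons₂, Bool.or_eq_true]
      exact Or.inr (by simpa using ih t)

theorem rmAS_pair : ∀ (p t : List Char), hasAS p = false →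
    rmAS (p ++ 'A' :: '*' :: t) = p ++ t := by
  intro p
  induction p with
  | nil => intro t _; simp [rmAS_cons₂]
  | cons x p' ih =>
    intro t h
    cases p' with
    | nil =>
      simp only [List.nil_append, List.cons_append]
      rw [rmAS_cons₂, if_neg (by simp), rmAS_cons₂, if_pos ⟨rfl, rfl⟩]
    | cons y p'' =>
      rw [List.cons_append, List.cons_append]
      rw [hasAS_cons₂] at h
      simp only [Bool.or_eq_false_iff, Bool.and_eq_false_iff, decide_eq_false_iff_not] at h
      rw [rmAS_cons₂]
      rw [if_neg (by rcases h.1 with h1 | h1 <;> tauto)]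
      have := ih t h.2
      simp only [List.cons_append] at this
      rw [this]
      simp

theorem hasAS_snoc : ∀ (st : List Char) (c : Char), hasAS st = false →
    ¬(st.getLast? = some 'A' ∧ c = '*') → hasAS (st ++ [c]) = false := by
  intro st
  induction st with
  | nil => intro c _ _; rfl
  | cons x t ih =>
    intro c h hc
    cases t with
    | nil =>
      simp only [List.getLast?_singleton] at hc
      have hxc : ¬ (x = 'A' ∧ c = '*') := fun ⟨h1, h2⟩ => hc ⟨by rw [h1], h2⟩
      simp only [List.cons_append, List.nil_append, hasAS_cons₂, hasAS_single,
        Bool.or_false, Bool.and_eq_false_iff, decide_eq_false_iff_not]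
      rcases Decidable.em (x = 'A') with hx | hx
      · exact Or.inr (fun h2 => hxc ⟨hx, h2⟩)
      · exact Or.inl hx
    | cons y t' =>
      rw [hasAS_cons₂] at h
      simp only [Bool.or_eq_false_iff] at h
      simp only [List.cons_append, hasAS_cons₂, Bool.or_eq_false_iff]
      refine ⟨h.1, ?_⟩
      have : hasAS ((y :: t') ++ [c]) = false := by
        apply ih c h.2
        intro hcs
        exact hc ⟨by rw [List.getLast?_cons_cons]; exact hcs.1, hcs.2⟩
      simpa using this

theorem bStep_eq (st : List Char) (c : Char) :
    bStep st c = if c = '*' ∧ st.getLast? = some 'A' then st.dropLast else st ++ [c] := by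
  cases st with
  | nil => simp [bStep]
  | cons x t =>
    unfold bStep
    have hget : PySem.List.pyGet? (x :: t) (-1) = (x :: t).getLast? := by
      have h := PySem.List.pyGet?_neg_ofNat (x :: t) 1 (by omega) (by simp)
      simp only [Nat.cast_one] at h
      rw [h, List.getLast?_eq_getElem?]
    rw [hget]
    simp

theorem stack_eq_N : ∀ (l st : List Char), hasAS st = false →
    List.foldl bStep st l = N (st ++ l) := by
  intro l
  induction l with
  | nil =>
    intro st h
    simp only [List.foldl_nil, List.append_nil]
    exact (N_of_false h).symm
  | cons c l ih =>
    intro st h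
    rw [List.foldl_cons, bStep_eq]
    by_cases hc : c = '*' ∧ st.getLast? = some 'A'
    · rw [if_pos hc]
      obtain ⟨p, hp⟩ : ∃ p, st = p ++ ['A'] := by
        rcases List.getLast?_eq_some_iff.mp hc.2 with ⟨p, hp⟩
        exact ⟨p, hp⟩
      have hdrop : st.dropLast = p := by rw [hp, List.dropLast_concat]
      have hpf : hasAS p = false := hasAS_prefix_false p ['A'] (hp ▸ h)
      rw [hdrop, ih p hpf]
      have hlist : st ++ c :: l = p ++ 'A' :: '*' :: l := by
        rw [hp, hc.1]; simp
      rw [hlist, N_of_true (hasAS_pair p l), rmAS_pair p l hpf]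
    · rw [if_neg hc]
      have hsn : hasAS (st ++ [c]) = false := by
        apply hasAS_snoc st c h
        intro hcs; exact hc ⟨hcs.2, hcs.1⟩
      rw [ih (st ++ [c]) hsn]
      simp

theorem aWhile_eq : ∀ (s lowest : List Char) (idx : Int),
    aWhile s lowest idx =
      (N s, if hasAS s = true ∧ idx < 0 then (['A','*'], (0 : Int)) else (lowest, idx)) := by
  intro s
  induction hn : s.length using Nat.strong_induction_on generalizing s with
  | _ n ih =>
  intro lowest idx
  rw [aWhile]
  by_cases h : PySem.Chars.isIn ['A','*'] s = true
  · have hAS : hasAS s = true := by rw [← isIn_AS_eq_hasAS]; exact h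
    have hidx0 : (((PySem.List.index? gradeOrder ['A','*']).getD 0 : Nat) : Int) = 0 := by decide
    rw [dif_pos h]
    have hlen : (rmAS s).length < n := hn ▸ rmAS_length_lt s hAS
    by_cases hi : idx < 0
    · simp only [hidx0, if_pos hi]
      rw [ih (rmAS s).length hlen (rmAS s) rfl ['A','*'] 0]
      rw [N_of_true hAS]
      simp [hAS, hi]
    · simp only [hidx0, if_neg hi]
      rw [ih (rmAS s).length hlen (rmAS s) rfl lowest idx]
      rw [N_of_true hAS]
      have hni : ¬ (hasAS (rmAS s) = true ∧ idx < 0) := fun hx => hi hx.2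
      simp [hni, hAS, hi]
  · have hAS : hasAS s = false :=
      Bool.eq_false_iff.mpr (fun he => h (by rw [isIn_AS_eq_hasAS]; exact he))
    rw [dif_neg h]
    simp [hAS, N_of_false hAS]

-- what the for loop returns, as a chain of membership tests
def lowSpec (r lowest : List Char) (idx : Int) : List Char :=
  if 'E' ∈ r ∧ idx < 5 then ['E'] else if 'D' ∈ r ∧ idx < 4 then ['D']
  else if 'C' ∈ r ∧ idx < 3 then ['C'] else if 'B' ∈ r ∧ idx < 2 then ['B']
  else if 'A' ∈ r ∧ idx < 1 then ['A'] else lowest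

theorem aForStep_letter (lowest : List Char) (idx : Int) (c : Char) (k : Int)
    (hmem : gradeOrder.contains [c] = true)
    (hk : (((PySem.List.index? gradeOrder [c]).getD 0 : Nat) : Int) = k) :
    aForStep (lowest, idx) c = if idx < k then ([c], k) else (lowest, idx) := by
  unfold aForStep
  simp only [hmem, if_true, hk]

theorem aFold_eq : ∀ (r lowest : List Char) (idx : Int), -1 ≤ idx → idx ≤ 5 →
    (r.foldl aForStep (lowest, idx)).1 = lowSpec r lowest idx := by
  intro r
  induction r with
  | nil => intro lowest idx _ _; simp [lowSpec]
  | cons c r ih =>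
    intro lowest idx h1 h2
    rw [List.foldl_cons]
    by_cases hA : c = 'A'
    · subst hA
      rw [aForStep_letter lowest idx 'A' 1 (by decide) (by decide)]
      split_ifs with hi
      · rw [ih ['A'] 1 (by omega) (by omega)]
        interval_cases idx <;> simp [lowSpec]
      · rw [ih lowest idx h1 h2]
        interval_cases idx <;> simp [lowSpec] <;> omega
    · by_cases hB : c = 'B'
      · subst hB
        rw [aForStep_letter lowest idx 'B' 2 (by decide) (by decide)]
        split_ifs with hi
        · rw [ih ['B'] 2 (by omega) (by omega)]
          interval_cases idx <;> simp [lowSpec]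
        · rw [ih lowest idx h1 h2]
          interval_cases idx <;> simp [lowSpec] <;> omega
      · by_cases hC : c = 'C'
        · subst hC
          rw [aForStep_letter lowest idx 'C' 3 (by decide) (by decide)]
          split_ifs with hi
          · rw [ih ['C'] 3 (by omega) (by omega)]
            interval_cases idx <;> simp [lowSpec]
          · rw [ih lowest idx h1 h2]
            interval_cases idx <;> simp [lowSpec] <;> omega
        · by_cases hD : c = 'D'
          · subst hD
            rw [aForStep_letter lowest idx 'D' 4 (by decide) (by decide)]
            split_ifs with hi
            · rw [ih ['D'] 4 (by omega) (by omega)]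
              interval_cases idx <;> simp [lowSpec]
            · rw [ih lowest idx h1 h2]
              interval_cases idx <;> simp [lowSpec] <;> omega
          · by_cases hE : c = 'E'
            · subst hE
              rw [aForStep_letter lowest idx 'E' 5 (by decide) (by decide)]
              split_ifs with hi
              · rw [ih ['E'] 5 (by omega) (by omega)]
                interval_cases idx <;> simp [lowSpec]
              · rw [ih lowest idx h1 h2]
                interval_cases idx <;> simp [lowSpec] <;> omega
            · have hnm : ([c] : List Char) ∉ gradeOrder := by
                simp [gradeOrder, hA, hB, hC, hD, hE]
              rw [show aForStep (lowest, idx) c = (lowest, idx) from by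
                unfold aForStep; simp [hnm]]
              rw [ih lowest idx h1 h2]
              simp [lowSpec, List.mem_cons, Ne.symm hA, Ne.symm hB, Ne.symm hC,
                Ne.symm hD, Ne.symm hE]

theorem N_length_le : ∀ s : List Char, (N s).length ≤ s.length := by
  intro s
  induction hn : s.length using Nat.strong_induction_on generalizing s with
  | _ n ih =>
  subst hn
  by_cases h : hasAS s = true
  · rw [N_of_true h]
    have h1 := rmAS_length_lt s h
    have h2 := ih (rmAS s).length h1 (rmAS s) rfl
    omega
  · rw [N_of_false (by simpa using h)]

theorem N_length_lt_iff (s : List Char) : (N s).length < s.length ↔ hasAS s = true := by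
  constructor
  · intro h
    by_contra hn
    rw [N_of_false (by simpa using hn)] at h
    omega
  · intro h
    rw [N_of_true h]
    have := N_length_le (rmAS s)
    have := rmAS_length_lt s h
    omega

theorem ofList_nilS : String.ofList ([] : List Char) = "" := rfl
theorem ofList_AS : String.ofList ['A','*'] = "A*" := rfl

-- ===== VERDICT (by name: the statement is the Claim_ definition above) =====
theorem find_lowest_grade_spec : Claim_equal_find_lowest_grade := by
  intro grades _
  unfold Spec_find_lowest_grade find_lowest_grade find_lowest_grade_alt
  by_cases h0 : grades.toList = []
  · simp [h0]
  · rw [if_neg h0, if_neg h0]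
    simp only []
    set l := PySem.Chars.upper (PySem.Chars.strip grades.toList) with hl
    rw [aWhile_eq l [] (-1)]
    rw [stack_eq_N l [] rfl, List.nil_append]
    by_cases hAS : hasAS l = true
    · rw [if_pos (show hasAS l = true ∧ (-1:Int) < 0 from ⟨hAS, by omega⟩)]
      rw [aFold_eq (N l) ['A','*'] 0 (by omega) (by omega)]
      have hlen : (N l).length < l.length := (N_length_lt_iff l).mpr hAS
      by_cases mE : 'E' ∈ N l <;> by_cases mD : 'D' ∈ N l <;> by_cases mC : 'C' ∈ N l <;>
        by_cases mB : 'B' ∈ N l <;> by_cases mA : 'A' ∈ N l <;>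
        simp [lowSpec, List.find?_cons, mE, mD, mC, mB, mA, hlen, List.contains_iff_mem,
          ofList_AS]
    · have hAS' : hasAS l = false := by simpa using hAS
      rw [if_neg (by simp [hAS'])]
      rw [aFold_eq (N l) [] (-1) (by omega) (by omega)]
      have hNl : N l = l := N_of_false hAS'
      rw [hNl]
      by_cases mE : 'E' ∈ l <;> by_cases mD : 'D' ∈ l <;> by_cases mC : 'C' ∈ l <;>
        by_cases mB : 'B' ∈ l <;> by_cases mA : 'A' ∈ l <;>
        simp [lowSpec, List.find?_cons, mE, mD, mC, mB, mA, List.contains_iff_mem,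
          ofList_nilS]
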